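-- pv_equiv track=rewrite | github.com/DreyerGuilherme/FPROG2024-1 | Lista8/Ex1.py | contar_letras_e_palavras
-- ===== SOURCE A (Python) =====
-- def contar_letras_e_palavras(frase):
--
-- #  Esta função recebe uma frase como entrada e retorna um dicionário com a quantidade total de letras e palavras na frase.
--
--   #Argumentos:
--     #frase (str): A frase a ser analisada.
--
--   #Retorna:
--    # dict: Um dicionário com as chaves 'letras' e 'palavras', contendo os valores correspondentes à quantidade de letras e palavras na frase.
--
--   numero_de_letras = 0
--   numero_de_palavras = 0
--
--   for caractere in frase:
--     if caractere.isalpha():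
--       numero_de_letras += 1
--
--   palavras = frase.split()
--   numero_de_palavras = len(palavras)
--
--   return {'letras': numero_de_letras, 'palavras': numero_de_palavras}
-- ===== SOURCE B (Python) =====
-- def contar_letras_e_palavras(frase):
--     # Single pass: count letters and word starts simultaneously with an in_word flag.
--     letras = 0
--     palavras = 0
--     in_word = False
--     for c in frase:
--         if c.isalpha():
--             letras += 1
--         if c.isspace():
--             in_word = False
--         else:
--             if not in_word:
--                 palavras += 1
--             in_word = True
--     return {'letras': letras, 'palavras': palavras}
-- ===== Notes on version B (the rewrite author's own statement) =====
-- stated objective: alternative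
-- what changed: Replaces A's two traversals (a letter-counting loop plus split()+len for words) with one combined pass that counts letters and whitespace-to-word transitions using an in_word flag, never materialising the word list.
import Mathlib
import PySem

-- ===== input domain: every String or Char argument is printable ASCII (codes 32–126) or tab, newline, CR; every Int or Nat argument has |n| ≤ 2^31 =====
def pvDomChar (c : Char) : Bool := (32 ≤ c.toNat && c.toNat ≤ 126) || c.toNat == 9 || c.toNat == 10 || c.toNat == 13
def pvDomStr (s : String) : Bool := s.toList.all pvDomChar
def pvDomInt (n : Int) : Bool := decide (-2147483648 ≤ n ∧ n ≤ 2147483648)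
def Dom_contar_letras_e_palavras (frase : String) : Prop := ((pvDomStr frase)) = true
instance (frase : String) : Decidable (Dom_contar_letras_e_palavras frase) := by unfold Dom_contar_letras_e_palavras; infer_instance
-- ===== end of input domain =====

-- B replaces A's two traversals (letter loop + split()+len) by one combined pass with an
-- in_word flag; same return value, proved equal on all inputs (objective: alternative).

-- ===== PORT A =====
def contar_letras_e_palavras (frase : String) : List (String × Int) :=
  -- for caractere in frase: if caractere.isalpha(): numero_de_letras += 1
  let numero_de_letras : Int :=
    frase.toList.foldl (fun n c => if PySem.Chars.isalpha c then n + 1 else n) 0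
  -- palavras = frase.split(); numero_de_palavras = len(palavras)
  let palavras := PySem.Str.split₀ frase
  let numero_de_palavras : Int := palavras.length
  -- {'letras': ..., 'palavras': ...} — dict literal with two distinct keys
  [("letras", numero_de_letras), ("palavras", numero_de_palavras)]

-- ===== PORT B =====
-- one step of B's single pass: state = (letras, palavras, in_word)
def pvBStep (st : Int × Int × Bool) (c : Char) : Int × Int × Bool :=
  let l : Int := if PySem.Chars.isalpha c then st.1 + 1 else st.1
  if PySem.Chars.isspace c then (l, st.2.1, false)
  else if st.2.2 then (l, st.2.1, true)
  else (l, st.2.1 + 1, true)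

def contar_letras_e_palavras_alt (frase : String) : List (String × Int) :=
  let st := frase.toList.foldl pvBStep (0, 0, false)
  [("letras", st.1), ("palavras", st.2.1)]

-- ===== PRECONDITION & SPEC =====
def Spec_contar_letras_e_palavras (frase : String) (out : List (String × Int)) : Prop := out = contar_letras_e_palavras_alt frase
instance (frase : String) (out : List (String × Int)) : Decidable (Spec_contar_letras_e_palavras frase out) := by unfold Spec_contar_letras_e_palavras; infer_instance

-- ===== CLAIM (what is proved, stated in full; the proofs are below) =====
def Claim_equal_contar_letras_e_palavras : Prop := ∀ (frase : String), Dom_contar_letras_e_palavras frase → Spec_contar_letras_e_palavras frase (contar_letras_e_palavras frase)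

-- ===== LEMMAS AND PROOFS =====

-- number of words starting in s, given whether we are currently inside a word
def pvWC (s : List Char) (inW : Bool) : Int :=
  match s with
  | [] => 0
  | c :: rest =>
    if PySem.Chars.isspace c then pvWC rest false
    else (if inW then 0 else 1) + pvWC rest true

-- split₀.go's output length, characterised by pvWC
theorem pvGoLen (s : List Char) : ∀ (cur : List Char) (acc : List (List Char)),
    ((PySem.Chars.split₀.go s cur acc).length : Int)
      = acc.length + (if cur.isEmpty then 0 else 1) + pvWC s (!cur.isEmpty) := by
  induction s with
  | nil =>
    intro cur acc
    simp only [PySem.Chars.split₀.go, pvWC]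
    split <;> simp
  | cons c rest ih =>
    intro cur acc
    simp only [PySem.Chars.split₀.go, pvWC]
    by_cases hs : PySem.Chars.isspace c = true
    · rw [if_pos hs, if_pos hs]
      by_cases hc : cur.isEmpty = true
      · rw [if_pos hc, if_pos hc, ih [] acc]
        simp
      · rw [if_neg hc, if_neg hc, ih [] (cur.reverse :: acc)]
        simp
        try ring
    · rw [if_neg hs, if_neg hs, ih (c :: cur) acc]
      by_cases hc : cur.isEmpty = true
      · have hnil : cur = [] := List.isEmpty_iff.mp hc
        subst hnil
        simp
        try ring
      · rw [if_neg hc]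
        simp [hc]
        try ring

-- the in_word flag after processing s
def pvFlag (s : List Char) (inW : Bool) : Bool :=
  match s with
  | [] => inW
  | c :: rest => pvFlag rest (!PySem.Chars.isspace c)

-- B's fold: first component is A's letter fold, second the word count via pvWC
theorem pvFoldSpec (s : List Char) : ∀ (l w : Int) (inW : Bool),
    s.foldl pvBStep (l, w, inW)
      = (s.foldl (fun n c => if PySem.Chars.isalpha c then n + 1 else n) l,
         w + pvWC s inW, pvFlag s inW) := by
  induction s with
  | nil => intro l w inW; simp [pvWC, pvFlag]
  | cons c rest ih =>
    intro l w inW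
    simp only [List.foldl_cons, pvWC, pvFlag]
    by_cases hs : PySem.Chars.isspace c = true
    · simp only [pvBStep, hs, if_pos, ih]
      simp
    · by_cases hw : inW = true
      · simp only [pvBStep, hs] at *
        simp [ih, hw]
      · simp only [Bool.not_eq_true] at hw
        simp only [pvBStep, hs] at *
        simp [ih, hw]
        ring

-- ===== VERDICT (by name: the statement is the Claim_ definition above) =====
theorem contar_letras_e_palavras_spec : Claim_equal_contar_letras_e_palavras := by
  intro frase _
  show contar_letras_e_palavras frase = contar_letras_e_palavras_alt frase
  simp only [contar_letras_e_palavras, contar_letras_e_palavras_alt,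
    PySem.Str.split₀, PySem.Chars.split₀, pvFoldSpec frase.toList 0 0 false]
  have h := pvGoLen frase.toList [] []
  simp only [List.length_nil, List.isEmpty_nil, if_pos, Nat.cast_zero, Bool.not_true,
    List.length_map] at h ⊢
  simp [h]
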